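-- pv_equiv track=rewrite | github.com/pypi-data/pypi-mirror-386 | packages/chatbot-tracer/chatbot_tracer-0.8.0-py3-none-any.whl/tracer/analysis/functionality_refinement.py | _parse_merge_response
-- ===== SOURCE A (Python) =====
-- def _parse_merge_response(content: str) -> tuple[str | None, str | None]:
--     """Parse name and description from LLM merge response."""
--     best_name = None
--     best_desc = None
--     lines = content.splitlines()
--     for line in lines:
--         line_lower = line.lower()
--         if line_lower.startswith("name:") and best_name is None:
--             best_name = line.split(":", 1)[1].strip()
--         elif line_lower.startswith("description:") and best_desc is None:
--             best_desc = line.split(":", 1)[1].strip()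
--     return best_name, best_desc
-- ===== SOURCE B (Python) =====
-- def _parse_merge_response(content: str) -> tuple[str | None, str | None]:
--     """Parse name and description from LLM merge response."""
--     lines = content.splitlines()
--     name = next((line.split(":", 1)[1].strip()
--                  for line in lines if line.lower().startswith("name:")), None)
--     desc = next((line.split(":", 1)[1].strip()
--                  for line in lines if line.lower().startswith("description:")), None)
--     return name, desc
-- ===== Notes on version B (the rewrite author's own statement) =====
-- stated objective: simpler
-- what changed: Replaces A's single interleaved loop carrying two accumulators with None-guards by two independent first-match scans (next over a generator per prefix), valid because no line can start with both prefixes.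
import Mathlib
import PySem

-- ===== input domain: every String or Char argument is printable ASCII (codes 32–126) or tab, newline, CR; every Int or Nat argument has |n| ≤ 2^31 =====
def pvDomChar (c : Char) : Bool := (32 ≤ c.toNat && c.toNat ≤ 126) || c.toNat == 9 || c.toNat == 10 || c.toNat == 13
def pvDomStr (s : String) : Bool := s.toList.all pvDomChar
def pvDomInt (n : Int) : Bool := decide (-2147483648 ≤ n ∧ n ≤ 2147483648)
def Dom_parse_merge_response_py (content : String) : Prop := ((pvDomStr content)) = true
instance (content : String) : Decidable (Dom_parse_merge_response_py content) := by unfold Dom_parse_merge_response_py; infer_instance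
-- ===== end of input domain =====

-- B replaces A's single interleaved accumulator loop by two independent first-match scans (simpler decomposition; same cost).

-- ===== PORT A =====
-- value of line.split(":", 1)[1].strip(); under both call sites the line contains ':' so pyGet? is some
def pvFieldValue (line : String) : String :=
  PySem.Str.strip ((PySem.List.pyGet? ((PySem.Str.splitMax? line ":" 1).getD []) 1).getD "")

def pvStepA (st : Option String × Option String) (line : String) : Option String × Option String :=
  let line_lower := PySem.Str.lower line
  if PySem.Str.startswith line_lower "name:" && st.1.isNone then
    (some (pvFieldValue line), st.2)
  else if PySem.Str.startswith line_lower "description:" && st.2.isNone then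
    (st.1, some (pvFieldValue line))
  else st

def parse_merge_response_py (content : String) : Option String × Option String :=
  (PySem.Str.splitlines content).foldl pvStepA (none, none)

-- ===== PORT B =====
-- first line whose lowercase starts with the prefix, mapped to its field value (next(generator, None))
def pvFirstField (lines : List String) (pre : String) : Option String :=
  (lines.find? (fun line => PySem.Str.startswith (PySem.Str.lower line) pre)).map pvFieldValue

def parse_merge_response_py_alt (content : String) : Option String × Option String :=
  let lines := PySem.Str.splitlines content
  (pvFirstField lines "name:", pvFirstField lines "description:")

-- ===== PRECONDITION & SPEC =====
def Spec_parse_merge_response_py (content : String) (out : Option String × Option String) : Prop := out = parse_merge_response_py_alt content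
instance (content : String) (out : Option String × Option String) : Decidable (Spec_parse_merge_response_py content out) := by unfold Spec_parse_merge_response_py; infer_instance

-- ===== CLAIM (what is proved, stated in full; the proofs are below) =====
def Claim_equal_parse_merge_response_py : Prop := ∀ (content : String), Dom_parse_merge_response_py content → Spec_parse_merge_response_py content (parse_merge_response_py content)

-- ===== LEMMAS AND PROOFS =====

-- a line cannot start (case-insensitively) with both "name:" and "description:"
theorem pv_not_both (l : String)
    (hn : PySem.Str.startswith (PySem.Str.lower l) "name:" = true) :
    PySem.Str.startswith (PySem.Str.lower l) "description:" = false := by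
  by_contra h
  rw [Bool.not_eq_false] at h
  simp only [PySem.Str.startswith_eq] at hn h
  rw [PySem.Chars.startswith_iff] at hn h
  obtain ⟨t1, h1⟩ := hn
  obtain ⟨t2, h2⟩ := h
  rw [← h1] at h2
  simp at h2

-- loop invariant: A's fold from any state is that state completed by B's two first-match scans
theorem pv_loopA (lines : List String) (n d : Option String) :
    lines.foldl pvStepA (n, d) =
      (n.or (pvFirstField lines "name:"), d.or (pvFirstField lines "description:")) := by
  induction lines generalizing n d with
  | nil => simp [pvFirstField]
  | cons l ls ih =>
    by_cases hn : PySem.Str.startswith (PySem.Str.lower l) "name:" = true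
    · have hd := pv_not_both l hn
      simp [PySem.Str.startswith_eq] at hn hd
      cases n with
      | none =>
        simp [List.foldl_cons, pvStepA, hn, hd, ih, pvFirstField, List.find?]
      | some a =>
        simp [List.foldl_cons, pvStepA, hn, hd, ih, pvFirstField, List.find?]
    · rw [Bool.not_eq_true] at hn
      by_cases hd : PySem.Str.startswith (PySem.Str.lower l) "description:" = true
      all_goals first
        | (rw [Bool.not_eq_true] at hd
           simp [PySem.Str.startswith_eq] at hn hd
           simp [List.foldl_cons, pvStepA, hn, hd, ih, pvFirstField, List.find?])
        | (simp [PySem.Str.startswith_eq] at hn hd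
           cases d with
           | none =>
             simp [List.foldl_cons, pvStepA, hn, hd, ih, pvFirstField, List.find?]
           | some a =>
             simp [List.foldl_cons, pvStepA, hn, hd, ih, pvFirstField, List.find?])

-- ===== VERDICT (by name: the statement is the Claim_ definition above) =====
theorem parse_merge_response_py_spec : Claim_equal_parse_merge_response_py := by
  intro content _
  unfold Spec_parse_merge_response_py parse_merge_response_py parse_merge_response_py_alt
  rw [pv_loopA]
  simp
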